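-- pv_equiv track=rewrite | github.com/vrolse/aq2replay | web/parsers/mvd2.py | _cluster_rounds
-- ===== SOURCE A (Python) =====
-- def _cluster_rounds(raw_frames: list, gap: int = 150, min_cluster: int = 2) -> list:
--     """Collapse individual player-respawn frame indices into true round boundaries.
--
--     In pickup/CTF a real round boundary is a *mass* respawn — multiple players
--     reappearing within a short window (``gap`` frames ≈ 15 s at 10 fps).
--     Single-player respawns (individual deaths) are ignored.
--
--     Returns a sorted list of frame indices, one per detected round start.
--     """
--     if not raw_frames:
--         return []
--     # Group consecutive frames that are within `gap` of each other
--     clusters: list = []          # list of (first_frame, count)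
--     cluster_start = raw_frames[0]
--     cluster_count = 1
--     prev = raw_frames[0]
--     for f in raw_frames[1:]:
--         if f - prev <= gap:
--             cluster_count += 1
--         else:
--             if cluster_count >= min_cluster:
--                 clusters.append(cluster_start)
--             cluster_start = f
--             cluster_count = 1
--         prev = f
--     if cluster_count >= min_cluster:
--         clusters.append(cluster_start)
--     return clusters
-- ===== SOURCE B (Python) =====
-- def _cluster_rounds(raw_frames: list, gap: int = 150, min_cluster: int = 2) -> list:
--     """Boundary-index formulation: find the positions where the frame jump
--     exceeds `gap`, treat them (plus 0 and n) as cut points, and report the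
--     frame at the left cut of every segment spanning >= min_cluster indices."""
--     n = len(raw_frames)
--     if n == 0:
--         return []
--     cuts = [0] + [i for i in range(1, n) if raw_frames[i] - raw_frames[i - 1] > gap] + [n]
--     return [raw_frames[s] for s, e in zip(cuts, cuts[1:]) if e - s >= min_cluster]
-- ===== Notes on version B (the rewrite author's own statement) =====
-- stated objective: alternative
-- what changed: B drops A's sequential (start, count, prev) accumulator loop entirely: it filters the index positions where the frame difference exceeds gap into a cut-point list (zero, then the junction positions, then n), pairs consecutive cut points with zip, and emits the frame at each pair's left cut when the pair spans at least min_cluster indices.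
import Mathlib
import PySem

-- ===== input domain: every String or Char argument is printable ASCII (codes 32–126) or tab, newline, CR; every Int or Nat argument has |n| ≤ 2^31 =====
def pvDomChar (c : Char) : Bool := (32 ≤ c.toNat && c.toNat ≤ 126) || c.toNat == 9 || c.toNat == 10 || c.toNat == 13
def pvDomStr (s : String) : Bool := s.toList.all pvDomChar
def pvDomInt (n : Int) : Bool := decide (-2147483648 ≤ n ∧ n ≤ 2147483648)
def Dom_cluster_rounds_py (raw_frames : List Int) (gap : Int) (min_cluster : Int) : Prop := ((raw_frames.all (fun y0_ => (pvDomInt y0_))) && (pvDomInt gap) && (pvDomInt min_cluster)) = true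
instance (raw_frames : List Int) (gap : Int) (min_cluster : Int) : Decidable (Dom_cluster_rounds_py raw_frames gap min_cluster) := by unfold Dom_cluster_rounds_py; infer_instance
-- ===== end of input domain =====

-- B replaces A's sequential accumulator loop by boundary-index arithmetic: filter the
-- positions whose frame difference exceeds gap, zip consecutive cut points, and keep the
-- frame at each segment's left cut (objective: alternative; same cost).

-- ===== PORT A =====
-- A's single loop, carrying clusters / cluster_start / cluster_count / prev.
def pvLoopA (gap min_cluster : Int) : List Int → Int → Int → Int → List Int → List Int
  | clusters, cluster_start, cluster_count, _prev, [] =>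
      if min_cluster ≤ cluster_count then clusters ++ [cluster_start] else clusters
  | clusters, cluster_start, cluster_count, prev, f :: rest =>
      if f - prev ≤ gap then
        pvLoopA gap min_cluster clusters cluster_start (cluster_count + 1) f rest
      else
        pvLoopA gap min_cluster
          (if min_cluster ≤ cluster_count then clusters ++ [cluster_start] else clusters)
          f 1 f rest

def cluster_rounds_py (raw_frames : List Int) (gap : Int) (min_cluster : Int) : List Int :=
  match raw_frames with
  | [] => []
  | x :: rest => pvLoopA gap min_cluster [] x 1 x rest

-- ===== PORT B =====
-- cuts list: zero, then every i in range(1, n) with raw[i] - raw[i-1] > gap, then n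
-- (the indices i, i-1 and the cut points s are always in range, so pyGetD is exact here).
def pvCuts (raw : List Int) (gap : Int) : List Int :=
  0 :: (((PySem.List.pyRange 1 (raw.length : Int) 1).filter
      (fun i => decide (gap < PySem.List.pyGetD raw i 0 - PySem.List.pyGetD raw (i - 1) 0)))
    ++ [(raw.length : Int)])

-- [raw[s] for s, e in zip(cuts, cuts[1:]) if e - s >= min_cluster]
def cluster_rounds_py_alt (raw_frames : List Int) (gap : Int) (min_cluster : Int) : List Int :=
  match raw_frames with
  | [] => []
  | _ :: _ =>
      (((pvCuts raw_frames gap).zip (pvCuts raw_frames gap).tail).filter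
          (fun p => decide (min_cluster ≤ p.2 - p.1))).map
        (fun p => PySem.List.pyGetD raw_frames p.1 0)

-- ===== PRECONDITION & SPEC =====
def Spec_cluster_rounds_py (raw_frames : List Int) (gap : Int) (min_cluster : Int) (out : List Int) : Prop := out = cluster_rounds_py_alt raw_frames gap min_cluster
instance (raw_frames : List Int) (gap : Int) (min_cluster : Int) (out : List Int) : Decidable (Spec_cluster_rounds_py raw_frames gap min_cluster out) := by unfold Spec_cluster_rounds_py; infer_instance

-- ===== CLAIM (what is proved, stated in full; the proofs are below) =====
def Claim_equal_cluster_rounds_py : Prop := ∀ (raw_frames : List Int) (gap : Int) (min_cluster : Int), Dom_cluster_rounds_py raw_frames gap min_cluster → Spec_cluster_rounds_py raw_frames gap min_cluster (cluster_rounds_py raw_frames gap min_cluster)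

-- ===== LEMMAS AND PROOFS =====

-- the junction-index part of pvCuts, named for the proofs
def pvJunc (L : List Int) (gap : Int) : List Int :=
  (PySem.List.pyRange 1 (L.length : Int) 1).filter
    (fun i => decide (gap < PySem.List.pyGetD L i 0 - PySem.List.pyGetD L (i - 1) 0))

theorem pvCuts_tail (L : List Int) (gap : Int) :
    (pvCuts L gap).tail = pvJunc L gap ++ [(L.length : Int)] := rfl

-- B's value with the first segment's reported span boosted by cc-1 and its start replaced
-- by cs: A's intermediate loop state expressed on B's side.
def pvG (gap mc cs cc : Int) (L : List Int) : List Int :=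
  (if mc ≤ ((pvCuts L gap).tail.headD 0) + cc - 1 then [cs] else []) ++
    (((pvCuts L gap).tail.zip (pvCuts L gap).tail.tail).filter
        (fun p => decide (mc ≤ p.2 - p.1))).map
      (fun p => PySem.List.pyGetD L p.1 0)

theorem pvGetD_shift (t : List Int) (p : Int) (i : Int) (h : 0 ≤ i) :
    PySem.List.pyGetD (p :: t) (i + 1) 0 = PySem.List.pyGetD t i 0 := by
  obtain ⟨k, rfl⟩ := Int.eq_ofNat_of_zero_le h
  have : ((k : Int) + 1) = ((k + 1 : Nat) : Int) := by push_cast; ring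
  rw [this, PySem.List.pyGetD_natCast, PySem.List.pyGetD_natCast]
  simp

theorem pvRange_shift (a b : Int) :
    PySem.List.pyRange (a + 1) (b + 1) 1 = (PySem.List.pyRange a b 1).map (· + 1) := by
  rw [PySem.List.pyRange_one, PySem.List.pyRange_one, List.map_map]
  have h : (b + 1 - (a + 1)) = b - a := by ring
  rw [h]
  exact List.map_congr_left (fun k _ => by simp; ring)

theorem pvJunc_step (p f : Int) (r : List Int) (gap : Int) :
    pvJunc (p :: f :: r) gap =
      (if gap < f - p then [1] else []) ++ (pvJunc (f :: r) gap).map (· + 1) := by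
  unfold pvJunc
  have hlen : ((p :: f :: r).length : Int) = ((f :: r).length : Int) + 1 := by
    simp only [List.length_cons]; push_cast; ring
  rw [hlen]
  have h1 : (1 : Int) < ((f :: r).length : Int) + 1 := by
    simp only [List.length_cons]; push_cast; omega
  rw [PySem.List.pyRange_one_cons h1, pvRange_shift 1 (((f :: r).length : Int))]
  rw [List.filter_cons, List.filter_map]
  have hp1 : PySem.List.pyGetD (p :: f :: r) 1 0 = f := by
    simp [PySem.List.pyGetD, PySem.List.pyGet?, PySem.List.pyIdx?]
  have hp0 : PySem.List.pyGetD (p :: f :: r) ((1:Int) - 1) 0 = p := by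
    norm_num [PySem.List.pyGetD, PySem.List.pyGet?, PySem.List.pyIdx?]
    rw [if_pos (by positivity)]
    simp
  have hfil : List.filter ((fun i => decide (gap < PySem.List.pyGetD (p :: f :: r) i 0 - PySem.List.pyGetD (p :: f :: r) (i - 1) 0)) ∘ (· + 1)) (PySem.List.pyRange 1 (((f :: r).length : Int)) 1)
      = List.filter (fun i => decide (gap < PySem.List.pyGetD (f :: r) i 0 - PySem.List.pyGetD (f :: r) (i - 1) 0)) (PySem.List.pyRange 1 (((f :: r).length : Int)) 1) := by
    apply List.filter_congr
    intro i hi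
    have h1i := (PySem.List.mem_pyRange_one.mp hi).1
    simp only [Function.comp]
    have e1 : i + 1 - 1 = i := by ring
    have e2 : PySem.List.pyGetD (p :: f :: r) (i + 1) 0 = PySem.List.pyGetD (f :: r) i 0 :=
      pvGetD_shift _ _ _ (by omega)
    have e3 : PySem.List.pyGetD (p :: f :: r) i 0 = PySem.List.pyGetD (f :: r) (i - 1) 0 := by
      have h4 := pvGetD_shift (f :: r) p (i - 1) (by omega)
      rw [show i - 1 + 1 = i by ring] at h4
      exact h4
    rw [e1, e2, e3]
  rw [hfil, hp1, hp0]
  by_cases h : gap < f - p <;> simp [h]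

theorem pvJunc_nonneg (L : List Int) (gap : Int) :
    ∀ x ∈ pvJunc L gap, 0 ≤ x := by
  intro x hx
  have hm := List.mem_of_mem_filter hx
  have := (PySem.List.mem_pyRange_one.mp hm).1
  omega

theorem zip_shift_map (T : List Int) (L tl : List Int) (mc : Int)
    (hmem : ∀ x ∈ T, 0 ≤ x)
    (hsh : ∀ i : Int, 0 ≤ i → PySem.List.pyGetD L (i + 1) 0 = PySem.List.pyGetD tl i 0) :
    ((((T.map (· + 1)).zip (T.map (· + 1)).tail).filter
        (fun q => decide (mc ≤ q.2 - q.1))).map (fun q => PySem.List.pyGetD L q.1 0))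
      = (((T.zip T.tail).filter (fun q => decide (mc ≤ q.2 - q.1))).map
          (fun q => PySem.List.pyGetD tl q.1 0)) := by
  rw [← List.map_tail, List.zip_map, List.filter_map, List.map_map]
  have hfil : List.filter ((fun q : Int × Int => decide (mc ≤ q.2 - q.1)) ∘ Prod.map (· + 1) (· + 1)) (T.zip T.tail)
      = List.filter (fun q : Int × Int => decide (mc ≤ q.2 - q.1)) (T.zip T.tail) := by
    apply List.filter_congr
    intro q _
    simp only [Function.comp, Prod.map]
    rw [decide_eq_decide]
    omega
  rw [hfil]
  apply List.map_congr_left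
  intro q hq
  have hz := List.of_mem_zip (List.mem_of_mem_filter hq)
  have h0 : 0 ≤ q.1 := hmem _ (by exact hz.1)
  simp only [Function.comp, Prod.map]
  exact hsh q.1 h0

theorem pvTailCuts_step (p f : Int) (r : List Int) (gap : Int) :
    (pvCuts (p :: f :: r) gap).tail =
      (if gap < f - p then [1] else []) ++ ((pvCuts (f :: r) gap).tail).map (· + 1) := by
  rw [pvCuts_tail, pvCuts_tail, pvJunc_step, List.map_append]
  have hlen : ((p :: f :: r).length : Int) = ((f :: r).length : Int) + 1 := by
    simp only [List.length_cons]; push_cast; ring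
  rw [hlen]
  simp [List.append_assoc]

theorem pvTailCuts_nonneg (L : List Int) (gap : Int) :
    ∀ x ∈ (pvCuts L gap).tail, 0 ≤ x := by
  intro x hx
  rw [pvCuts_tail] at hx
  rcases List.mem_append.mp hx with h | h
  · exact pvJunc_nonneg _ _ _ h
  · simp at h; omega

theorem pvTailCuts_ne_nil (L : List Int) (gap : Int) : (pvCuts L gap).tail ≠ [] := by
  rw [pvCuts_tail]; simp

theorem pvG_step (gap mc cs cc p f : Int) (r : List Int) :
    pvG gap mc cs cc (p :: f :: r) =
      if f - p ≤ gap then pvG gap mc cs (cc + 1) (f :: r)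
      else (if mc ≤ cc then [cs] else []) ++ pvG gap mc f 1 (f :: r) := by
  obtain ⟨t, ts, hT⟩ := List.exists_cons_of_ne_nil (pvTailCuts_ne_nil (f :: r) gap)
  have hnn : ∀ x ∈ (pvCuts (f :: r) gap).tail, 0 ≤ x := pvTailCuts_nonneg _ _
  have hsh : ∀ i : Int, 0 ≤ i →
      PySem.List.pyGetD (p :: f :: r) (i + 1) 0 = PySem.List.pyGetD (f :: r) i 0 :=
    fun i hi => pvGetD_shift _ _ _ hi
  have hzs := zip_shift_map ((pvCuts (f :: r) gap).tail) (p :: f :: r) (f :: r) mc hnn hsh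
  by_cases h : f - p ≤ gap
  · rw [if_pos h]
    have hb : ¬ gap < f - p := by omega
    unfold pvG
    rw [pvTailCuts_step, if_neg hb, List.nil_append, hzs]
    rw [hT]
    simp only [List.map_cons, List.headD_cons]
    by_cases h4 : mc ≤ t + cc <;>
      simp [show (mc ≤ t + 1 + cc - 1) = (mc ≤ t + cc) from by rw [eq_iff_iff]; omega,
            show (mc ≤ t + (cc + 1) - 1) = (mc ≤ t + cc) from by rw [eq_iff_iff]; omega, h4]
  · rw [if_neg h]
    have hb : gap < f - p := by omega
    unfold pvG
    rw [pvTailCuts_step, if_pos hb, List.singleton_append]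
    rw [hT] at hzs ⊢
    simp only [List.map_cons, List.tail_cons] at hzs
    have hp1 : PySem.List.pyGetD (p :: f :: r) 1 0 = f := by
      simp [PySem.List.pyGetD, PySem.List.pyGet?, PySem.List.pyIdx?]
    simp only [List.map_cons, List.headD_cons, List.tail_cons, List.zip_cons_cons,
      List.filter_cons]
    by_cases h2 : mc ≤ t <;> by_cases h3 : mc ≤ cc <;>
      simp [show (mc ≤ 1 + cc - 1) = (mc ≤ cc) from by rw [eq_iff_iff]; omega,
            show (mc ≤ t + 1 - 1) = (mc ≤ t) from by rw [eq_iff_iff]; omega, h2, h3, hp1, hzs]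

theorem pvG_single (gap mc cs cc p : Int) :
    pvG gap mc cs cc [p] = if mc ≤ cc then [cs] else [] := by
  unfold pvG
  have hj : pvJunc [p] gap = [] := by
    unfold pvJunc
    rw [PySem.List.pyRange_one_eq_nil (by simp)]
    simp
  have hl : (([p].length : Int)) = 1 := by simp
  simp only [pvCuts_tail, hj, List.nil_append, hl]
  by_cases h : mc ≤ cc <;>
    simp [show (mc ≤ 1 + cc - 1) = (mc ≤ cc) from by rw [eq_iff_iff]; omega, h]

theorem pvLoopA_eq_G (gap mc : Int) (rest : List Int) :
    ∀ (prev : Int) (clusters : List Int) (cs cc : Int),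
      pvLoopA gap mc clusters cs cc prev rest = clusters ++ pvG gap mc cs cc (prev :: rest) := by
  induction rest with
  | nil =>
      intro prev clusters cs cc
      rw [pvG_single]
      unfold pvLoopA
      split_ifs <;> simp
  | cons f r ih =>
      intro prev clusters cs cc
      rw [pvG_step]
      simp only [pvLoopA]
      by_cases h : f - prev ≤ gap
      · rw [if_pos h, if_pos h, ih]
      · rw [if_neg h, if_neg h, ih]
        split_ifs <;> simp [List.append_assoc]

theorem alt_eq_G (x : Int) (rest : List Int) (gap mc : Int) :
    cluster_rounds_py_alt (x :: rest) gap mc = pvG gap mc x 1 (x :: rest) := by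
  obtain ⟨t, ts, hT⟩ := List.exists_cons_of_ne_nil (pvTailCuts_ne_nil (x :: rest) gap)
  have hc : pvCuts (x :: rest) gap = 0 :: t :: ts := by
    rw [show pvCuts (x :: rest) gap = 0 :: (pvCuts (x :: rest) gap).tail from rfl, hT]
  have hp0 : PySem.List.pyGetD (x :: rest) 0 0 = x := by
    simp [PySem.List.pyGetD, PySem.List.pyGet?, PySem.List.pyIdx?]
  unfold cluster_rounds_py_alt pvG
  simp only [hc, hT, List.tail_cons, List.zip_cons_cons, List.filter_cons, List.headD_cons]
  by_cases h : mc ≤ t <;>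
    simp [show (mc ≤ t - 0) = (mc ≤ t) from by rw [eq_iff_iff]; omega,
      show (mc ≤ t + 1 - 1) = (mc ≤ t) from by rw [eq_iff_iff]; omega, h, hp0]

-- ===== VERDICT (by name: the statement is the Claim_ definition above) =====
theorem cluster_rounds_py_spec : Claim_equal_cluster_rounds_py := by
  intro raw_frames gap mc _
  unfold Spec_cluster_rounds_py
  cases raw_frames with
  | nil => rfl
  | cons x rest =>
      rw [show cluster_rounds_py (x :: rest) gap mc = pvLoopA gap mc [] x 1 x rest from rfl,
        pvLoopA_eq_G, List.nil_append, alt_eq_G]
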